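-- pv_equiv track=rewrite | github.com/Flanders1914/544 | final_result.py | setup_dp_table
-- ===== SOURCE A (Python) =====
-- def setup_dp_table(s: str) -> list[int]:
--     """
--     Set up a dynamic programming table to store the minimum cuts needed for each substring.
--
--     Parameters:
--     s (str): The input string.
--
--     Returns:
--     list[int]: A list where each index represents the minimum cuts needed for the substring from the start to that index.
--
--     Example:
--     >>> setup_dp_table('aab')
--     [0, 1, 1]
--     """
--     n = len(s)
--     cuts = [0] * n
--
--     for i in range(n):
--         min_cuts = i  # Maximum cuts possible is i (cutting before each character)
--         for j in range(i + 1):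
--             if s[j:i + 1] == s[j:i + 1][::-1]:  # Check if substring s[j:i+1] is a palindrome
--                 min_cuts = 0 if j == 0 else min(min_cuts, cuts[j - 1] + 1)
--         cuts[i] = min_cuts
--
--     return cuts
-- ===== SOURCE B (Python) =====
-- def setup_dp_table(s: str) -> list[int]:
--     """O(n^2): carry one row of end-at-i palindrome flags instead of re-slicing, then DP over it."""
--     n = len(s)
--     cuts = []
--     prev = []  # prev[j] == (s[j:i] is a palindrome), for the previous i
--     for i in range(n):
--         cur = [s[j] == s[i] and (i - j < 2 or prev[j + 1]) for j in range(i + 1)]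
--         if cur[0]:
--             cuts.append(0)
--         else:
--             best = i
--             for j in range(1, i + 1):
--                 if cur[j]:
--                     best = min(best, cuts[j - 1] + 1)
--             cuts.append(best)
--         prev = cur
--     return cuts
-- ===== Notes on version B (the rewrite author's own statement) =====
-- stated objective: faster
-- what changed: B replaces A's O(n) slice-and-reverse palindrome test inside the double loop by a rolling one-row DP of end-at-i palindrome flags (cur[j] = s[j]==s[i] and (i-j<2 or prev[j+1])), dropping the total cost from O(n^3) to O(n^2).
import Mathlib
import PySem

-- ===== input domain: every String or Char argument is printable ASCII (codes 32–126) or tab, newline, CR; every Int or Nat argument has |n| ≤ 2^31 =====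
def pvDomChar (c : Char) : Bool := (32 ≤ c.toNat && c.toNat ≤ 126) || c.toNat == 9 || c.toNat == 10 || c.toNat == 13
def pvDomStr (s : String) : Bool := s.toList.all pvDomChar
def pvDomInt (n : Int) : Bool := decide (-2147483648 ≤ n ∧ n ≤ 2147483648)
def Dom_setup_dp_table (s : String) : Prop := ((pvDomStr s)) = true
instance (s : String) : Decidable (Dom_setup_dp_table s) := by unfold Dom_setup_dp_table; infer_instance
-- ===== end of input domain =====

-- B replaces A's slice-and-reverse palindrome test inside the double loop by a rolling
-- one-row DP of end-at-i palindrome flags (objective: faster; measured).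

-- ===== PORT A =====
-- s[j:i+1] with nonnegative bounds is PySem.List.slice on the char list; s[j:i+1][::-1]
-- is list reversal (PySem.List.slice?_none_none_neg_one); string '==' is char-list equality.
def pvSubA (cs : List Char) (j i : Nat) : List Char :=
  PySem.List.slice cs (some (j : Int)) (some ((i : Int) + 1))

-- for i in range(n) / for j in range(i + 1): every index is nonnegative and in range
-- (i < n and 1 ≤ j ≤ i < len(cuts)), so the loops are folds over List.range and
-- cuts[i] = … / cuts[j - 1] are List.set / List.getD (exact here).
def setup_dp_table (s : String) : List Int :=
  let cs := s.toList
  let n := cs.length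
  (List.range n).foldl
    (fun cuts i =>
      let min_cuts := (List.range (i + 1)).foldl
        (fun min_cuts j =>
          if pvSubA cs j i == (pvSubA cs j i).reverse then
            if j == 0 then 0 else min min_cuts (cuts.getD (j - 1) 0 + 1)
          else min_cuts)
        ((i : Int))
      cuts.set i min_cuts)
    (List.replicate n 0)

-- ===== PORT B =====
-- cur = [s[j] == s[i] and (i - j < 2 or prev[j + 1]) for j in range(i + 1)]
-- ('and'/'or' short-circuit: prev[j + 1] is only reached when i - j >= 2, where it is
-- in range, so List.getD is exact).
def pvRowB (cs : List Char) (prev : List Bool) (i : Nat) : List Bool :=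
  (List.range (i + 1)).map (fun j =>
    cs.getD j ' ' == cs.getD i ' ' && (decide (i - j < 2) || prev.getD (j + 1) false))

-- for j in range(1, i + 1): written with j' = j - 1 running over range i, so cuts[j - 1]
-- is cuts.getD j' (in range: j' < i = len cuts when row i is processed).
def pvCutB (cur : List Bool) (cuts : List Int) (i : Nat) : Int :=
  if cur.getD 0 false then 0
  else (List.range i).foldl
    (fun best j' => if cur.getD (j' + 1) false then min best (cuts.getD j' 0 + 1) else best)
    ((i : Int))

def pvStepB (cs : List Char) (st : List Bool × List Int) (i : Nat) : List Bool × List Int :=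
  let cur := pvRowB cs st.1 i
  (cur, st.2 ++ [pvCutB cur st.2 i])

def setup_dp_table_alt (s : String) : List Int :=
  let cs := s.toList
  ((List.range cs.length).foldl (pvStepB cs) ([], [])).2

-- ===== PRECONDITION & SPEC =====
def Spec_setup_dp_table (s : String) (out : List Int) : Prop := out = setup_dp_table_alt s
instance (s : String) (out : List Int) : Decidable (Spec_setup_dp_table s out) := by unfold Spec_setup_dp_table; infer_instance

-- ===== CLAIM (what is proved, stated in full; the proofs are below) =====
def Claim_equal_setup_dp_table : Prop := ∀ (s : String), Dom_setup_dp_table s → Spec_setup_dp_table s (setup_dp_table s)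

-- ===== LEMMAS AND PROOFS =====

-- the palindrome test of A, as a pure predicate on (start, end) index pairs
def isPal (cs : List Char) (j i : Nat) : Bool :=
  ((cs.drop j).take (i + 1 - j)) == ((cs.drop j).take (i + 1 - j)).reverse

-- reference computation both ports are reduced to
def refStep (cs : List Char) (cuts : List Int) (i : Nat) : Int :=
  if isPal cs 0 i then 0
  else (List.range i).foldl
    (fun best j' => if isPal cs (j' + 1) i then min best (cuts.getD j' 0 + 1) else best)
    ((i : Int))

def refCuts (cs : List Char) (n : Nat) : List Int :=
  (List.range n).foldl (fun cuts i => cuts ++ [refStep cs cuts i]) []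

lemma refCuts_succ (cs : List Char) (n : Nat) :
    refCuts cs (n + 1) = refCuts cs n ++ [refStep cs (refCuts cs n) n] := by
  rw [refCuts, List.range_succ, List.foldl_concat]; rfl

lemma refCuts_length (cs : List Char) (n : Nat) : (refCuts cs n).length = n := by
  induction n with
  | zero => rfl
  | succ n ih => rw [refCuts_succ]; simp [ih]

lemma getD_nonneg (l : List Int) (h : ∀ x ∈ l, 0 ≤ x) (n : Nat) : 0 ≤ l.getD n 0 := by
  rcases Nat.lt_or_ge n l.length with hn | hn
  · rw [List.getD_eq_getElem _ _ hn]; exact h _ (List.getElem_mem hn)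
  · rw [List.getD_eq_default _ _ hn]

lemma fold_min_nonneg (p : Nat → Bool) (g : Nat → Int) (l : List Nat) (acc : Int)
    (hacc : 0 ≤ acc) (hg : ∀ x, 0 ≤ g x) :
    0 ≤ l.foldl (fun b j => if p j then min b (g j + 1) else b) acc := by
  induction l generalizing acc with
  | nil => exact hacc
  | cons x xs ih =>
    simp only [List.foldl_cons]
    apply ih
    split
    · exact le_min hacc (by have := hg x; omega)
    · exact hacc

lemma fold_min_zero (p : Nat → Bool) (g : Nat → Int) (l : List Nat)
    (hg : ∀ x, 0 ≤ g x) :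
    l.foldl (fun b j => if p j then min b (g j + 1) else b) 0 = 0 := by
  induction l with
  | nil => rfl
  | cons x xs ih =>
    simp only [List.foldl_cons]
    have h : (if p x then min 0 (g x + 1) else 0) = 0 := by
      split
      · have := hg x; omega
      · rfl
    rw [h, ih]

lemma refStep_nonneg (cs : List Char) (cuts : List Int) (i : Nat)
    (h : ∀ x ∈ cuts, 0 ≤ x) : 0 ≤ refStep cs cuts i := by
  rw [refStep]
  split
  · rfl
  · exact fold_min_nonneg _ _ _ _ (by positivity) (fun x => getD_nonneg cuts h x)

lemma refCuts_nonneg (cs : List Char) (n : Nat) : ∀ x ∈ refCuts cs n, 0 ≤ x := by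
  induction n with
  | zero => intro x hx; simp [refCuts] at hx
  | succ n ih =>
    rw [refCuts_succ]
    intro x hx
    rcases List.mem_append.mp hx with hx | hx
    · exact ih x hx
    · rcases List.mem_singleton.mp hx with rfl
      exact refStep_nonneg cs _ n ih

lemma pal_cons_concat (a b : Char) (m : List Char) :
    (a :: (m ++ [b]) = (a :: (m ++ [b])).reverse) ↔ (a = b ∧ m = m.reverse) := by
  simp [List.reverse_cons, List.reverse_append]
  exact fun h _ => h.symm

-- the crux: A's whole-substring palindrome test satisfies B's one-step recurrence
lemma isPal_step (cs : List Char) (j i : Nat) (hj : j ≤ i) (hi : i < cs.length) :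
    isPal cs j i =
      (cs.getD j ' ' == cs.getD i ' ' && (decide (i - j < 2) || isPal cs (j + 1) (i - 1))) := by
  have hj' : j < cs.length := lt_of_le_of_lt hj hi
  have hgj : cs.getD j ' ' = cs[j] := List.getD_eq_getElem _ _ hj'
  have hgi : cs.getD i ' ' = cs[i] := List.getD_eq_getElem _ _ hi
  have hdj : cs.drop j = cs[j] :: cs.drop (j + 1) := List.drop_eq_getElem_cons hj'
  by_cases hii : i = j
  · subst hii
    have h1 : i + 1 - i = 1 := by omega
    have h2 : List.take 1 (List.drop i cs) = [cs[i]] := by rw [hdj]; rfl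
    rw [isPal, h1, h2]
    simp
  · by_cases hone : i = j + 1
    · subst hone
      have hdj1 : cs.drop (j + 1) = cs[j + 1] :: cs.drop (j + 2) := List.drop_eq_getElem_cons hi
      have h2 : (j : Nat) + 1 + 1 - j = 2 := by omega
      rw [isPal, h2, hdj, hdj1]
      simp only [List.take_succ_cons, List.take_zero, hgj, hgi]
      by_cases h : cs[j] = cs[j+1] <;> simp [h]
    · have hidx : (cs.drop (j+1))[i - j - 1]? = some cs[i] := by
        rw [List.getElem?_drop]
        have h : j + 1 + (i - j - 1) = i := by omega
        rw [h, List.getElem?_eq_getElem hi]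
      have h2 : (cs.drop (j+1)).take (i - j) = (cs.drop (j+1)).take (i - j - 1) ++ [cs[i]] := by
        have h : i - j = (i - j - 1) + 1 := by omega
        rw [h, List.take_add_one, hidx]
        rfl
      have hsub : (cs.drop j).take (i + 1 - j)
          = cs[j] :: ((cs.drop (j+1)).take (i - j - 1) ++ [cs[i]]) := by
        have h : i + 1 - j = (i - j) + 1 := by omega
        rw [h, hdj, List.take_succ_cons, h2]
      have hmid : (i - 1) + 1 - (j + 1) = i - j - 1 := by omega
      rw [isPal, isPal, hsub, hmid, hgj, hgi]
      have hd2 : decide (i - j < 2) = false := by simp; omega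
      rw [hd2]
      rw [Bool.eq_iff_iff]
      simp only [beq_iff_eq, Bool.and_eq_true, Bool.or_eq_true, Bool.false_eq_true, false_or]
      rw [pal_cons_concat]

lemma getD_map_range {β : Type} [Inhabited β] (f : Nat → β) (k m : Nat) (d : β) (h : m < k) :
    (((List.range k).map f).getD m d) = f m := by
  rw [List.getD_eq_getElem _ _ (by simpa using h)]
  simp

lemma row_eq (cs : List Char) (k : Nat) (hk : k < cs.length) :
    pvRowB cs ((List.range k).map (fun j => isPal cs j (k - 1))) k
      = (List.range (k + 1)).map (fun j => isPal cs j k) := by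
  rw [pvRowB]
  apply List.map_congr_left
  intro j hj
  have hjk : j ≤ k := by simpa [Nat.lt_succ_iff] using List.mem_range.mp hj
  rw [isPal_step cs j k hjk hk]
  by_cases h2 : k - j < 2
  · simp [h2]
  · have hjj : j + 1 < k := by omega
    rw [getD_map_range _ k (j+1) false hjj]

lemma cut_eq (cs : List Char) (cuts : List Int) (k : Nat) :
    pvCutB ((List.range (k + 1)).map (fun j => isPal cs j k)) cuts k = refStep cs cuts k := by
  rw [pvCutB, refStep, getD_map_range _ (k+1) 0 false (by omega)]
  split
  · rfl
  · apply PySem.List.foldl_congr_mem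
    intro acc x hx
    have hxk : x + 1 < k + 1 := by simpa using List.mem_range.mp hx
    rw [getD_map_range _ (k+1) (x+1) false hxk]

lemma B_loop (cs : List Char) (k : Nat) (hk : k ≤ cs.length) :
    (List.range k).foldl (pvStepB cs) ([], [])
      = ((List.range k).map (fun j => isPal cs j (k - 1)), refCuts cs k) := by
  induction k with
  | zero => rfl
  | succ k ih =>
    rw [List.range_succ, List.foldl_concat, ih (by omega)]
    have hklen : k < cs.length := by omega
    rw [pvStepB]
    simp only []
    rw [row_eq cs k hklen, cut_eq cs (refCuts cs k) k, refCuts_succ]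
    simp only [Prod.mk.injEq, Nat.add_sub_cancel]
    exact ⟨by rw [List.range_succ], trivial⟩

lemma pvSubA_eq (cs : List Char) (j i : Nat) :
    pvSubA cs j i = (cs.drop j).take (i + 1 - j) := by
  have h : ((i : Int) + 1) = ((i + 1 : Nat) : Int) := by push_cast; ring
  rw [pvSubA, h, PySem.List.slice_natCast]

lemma condA_eq (cs : List Char) (j i : Nat) :
    (pvSubA cs j i == (pvSubA cs j i).reverse) = isPal cs j i := by
  rw [pvSubA_eq, isPal]

lemma refStep_append (cs : List Char) (pre post : List Int) (k : Nat) (hlen : k ≤ pre.length) :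
    refStep cs (pre ++ post) k = refStep cs pre k := by
  rw [refStep, refStep]
  split
  · rfl
  · apply PySem.List.foldl_congr_mem
    intro acc x hx
    have hxk : x < k := List.mem_range.mp hx
    rw [List.getD_append _ _ _ _ (by omega)]

lemma innerA_eq (cs : List Char) (cuts : List Int) (k : Nat) (hnn : ∀ x ∈ cuts, 0 ≤ x) :
    (List.range (k + 1)).foldl
      (fun m j => if isPal cs j k then (if j == 0 then 0 else min m (cuts.getD (j - 1) 0 + 1)) else m)
      ((k : Int)) = refStep cs cuts k := by
  rw [List.range_succ_eq_map, List.foldl_cons, List.foldl_map, refStep]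
  have hbody : (fun (m : Int) (j' : Nat) =>
      if isPal cs (Nat.succ j') k then (if Nat.succ j' == 0 then 0 else min m (cuts.getD (Nat.succ j' - 1) 0 + 1)) else m)
      = fun m j' => if isPal cs (j' + 1) k then min m (cuts.getD j' 0 + 1) else m := by
    funext m j'
    simp [Nat.succ_eq_add_one]
  rw [hbody]
  have hfirst : (if isPal cs 0 k then (if (0:Nat) == 0 then (0:Int) else min (k:Int) (cuts.getD (0 - 1) 0 + 1)) else (k:Int))
      = if isPal cs 0 k then 0 else (k:Int) := by simp
  rw [hfirst]
  by_cases h : isPal cs 0 k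
  · rw [if_pos h, if_pos h]
    exact fold_min_zero _ _ _ (fun x => getD_nonneg cuts hnn x)
  · rw [if_neg h, if_neg h]

lemma A_loop (cs : List Char) (k : Nat) (hk : k ≤ cs.length) :
    (List.range k).foldl
      (fun cuts i =>
        let min_cuts := (List.range (i + 1)).foldl
          (fun min_cuts j =>
            if pvSubA cs j i == (pvSubA cs j i).reverse then
              if j == 0 then 0 else min min_cuts (cuts.getD (j - 1) 0 + 1)
            else min_cuts)
          ((i : Int))
        cuts.set i min_cuts)
      (List.replicate cs.length 0)
      = refCuts cs k ++ List.replicate (cs.length - k) 0 := by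
  induction k with
  | zero => simp [refCuts]
  | succ k ih =>
    rw [List.range_succ, List.foldl_concat, ih (by omega)]
    simp only [condA_eq]
    have hprelen : (refCuts cs k).length = k := refCuts_length cs k
    have hnn : ∀ x ∈ refCuts cs k ++ List.replicate (cs.length - k) 0, 0 ≤ x := by
      intro x hx
      rcases List.mem_append.mp hx with hx | hx
      · exact refCuts_nonneg cs k x hx
      · rw [List.eq_of_mem_replicate hx]
    rw [innerA_eq cs _ k hnn, refStep_append cs (refCuts cs k) _ k (by omega)]
    have hrep : List.replicate (cs.length - k) (0:Int)
        = 0 :: List.replicate (cs.length - (k+1)) 0 := by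
      have h : cs.length - k = (cs.length - (k+1)) + 1 := by omega
      rw [h, List.replicate_succ]
    rw [List.set_append, hprelen, if_neg (by omega), Nat.sub_self, hrep]
    rw [refCuts_succ]
    simp

-- ===== VERDICT (by name: the statement is the Claim_ definition above) =====
theorem setup_dp_table_spec : Claim_equal_setup_dp_table := by
  intro s _
  show setup_dp_table s = setup_dp_table_alt s
  rw [show setup_dp_table_alt s
      = ((List.range s.toList.length).foldl (pvStepB s.toList) ([], [])).2 from rfl]
  rw [show setup_dp_table s
      = (List.range s.toList.length).foldl
          (fun cuts i =>
            let min_cuts := (List.range (i + 1)).foldl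
              (fun min_cuts j =>
                if pvSubA s.toList j i == (pvSubA s.toList j i).reverse then
                  if j == 0 then 0 else min min_cuts (cuts.getD (j - 1) 0 + 1)
                else min_cuts)
              ((i : Int))
            cuts.set i min_cuts)
          (List.replicate s.toList.length 0) from rfl]
  rw [A_loop s.toList s.toList.length le_rfl, B_loop s.toList s.toList.length le_rfl]
  simp
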